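-- pv_equiv track=rewrite | github.com/m-luck/state_space_searcher | 2_hill_climber/component_operators.py | findQ
-- ===== SOURCE A (Python) =====
-- def findQ(tasks: list, S: int, debug: bool) -> int:
--     '''
--     Finds the minimum Q-amount of tasks in a list before the targest value S can be reached. This resulting count is denoted by Q.
--     '''
--     Qthresh = 0 # Tracking the minimum target value needed.
--     Qcount = 0  # Tracking the minimum amount of tasks needed for solution (tasks sorted largest to small).
--     tasks = sorted(tasks, reverse=True) # Largest to small.
--     for task in tasks:
--         Qthresh += task
--         Qcount += 1
--         if Qthresh > S:
--             break
--     return(Qcount)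
-- ===== SOURCE B (Python) =====
-- def findQ(tasks: list, S: int, debug: bool) -> int:
--     '''
--     Finds the minimum Q-amount of tasks in a list before the targest value S can be reached.
--     Selection-based: repeatedly extract the current maximum instead of sorting first.
--     '''
--     remaining = list(tasks)
--     count = 0
--     while remaining:
--         m = max(remaining)
--         remaining.remove(m)
--         count += 1
--         if m > S:
--             return count
--         S -= m
--     return count
-- ===== Notes on version B (the rewrite author's own statement) =====
-- stated objective: alternative
-- what changed: A builds a fully sorted descending copy and then scans it; B never sorts: it repeatedly extracts the current maximum (max + remove) from the remaining tasks, subtracting it from the target until it is exceeded, with the same early exit.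
import Mathlib
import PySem

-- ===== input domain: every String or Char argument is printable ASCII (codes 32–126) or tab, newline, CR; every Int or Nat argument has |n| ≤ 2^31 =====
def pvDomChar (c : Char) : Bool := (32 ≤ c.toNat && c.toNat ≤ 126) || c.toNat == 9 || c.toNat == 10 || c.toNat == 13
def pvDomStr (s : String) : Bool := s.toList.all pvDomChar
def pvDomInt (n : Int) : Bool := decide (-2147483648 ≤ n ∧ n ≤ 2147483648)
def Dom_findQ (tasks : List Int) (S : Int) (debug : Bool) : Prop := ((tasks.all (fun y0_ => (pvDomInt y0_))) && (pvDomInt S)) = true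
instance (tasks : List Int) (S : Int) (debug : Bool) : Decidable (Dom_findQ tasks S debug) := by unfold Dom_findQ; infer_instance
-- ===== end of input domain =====

-- B replaces A's full descending sort + scan by repeated max-extraction (selection), stopping at the
-- same early-exit condition; an alternative algorithm of similar cost, return value identical.

-- ===== PORT A =====
-- the 'for task in tasks: … if Qthresh > S: break' loop, as structural recursion over the sorted list
def findQ_loop : List Int → Int → Int → Int → Int
  | [], _, _, qcount => qcount
  | task :: rest, S, qthresh, qcount =>
      let qthresh' := qthresh + task
      let qcount' := qcount + 1
      if qthresh' > S then qcount' else findQ_loop rest S qthresh' qcount'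

def findQ (tasks : List Int) (S : Int) (debug : Bool) : Int :=
  findQ_loop (PySem.List.sorted tasks (fun x => x) true) S 0 0

-- ===== PORT B =====
-- the 'while remaining: m = max(remaining); remaining.remove(m); …' loop of Source B
-- (max = List.max?, first maximal value; list.remove of a present value = List.erase, first occurrence)
def findQ_alt_loop : List Int → Int → Int → Int
  | [], _, count => count
  | x :: xs, S, count =>
      let m := ((x :: xs).max?).getD 0
      let remaining := (x :: xs).erase m
      if m > S then count + 1 else findQ_alt_loop remaining (S - m) (count + 1)
  termination_by l => l.length
  decreasing_by
    have hm : ((x :: xs).max?).getD 0 ∈ x :: xs := by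
      cases h : (x :: xs).max? with
      | none => simp at h
      | some v => simpa [h] using List.max?_mem h
    have := List.length_erase_of_mem hm
    simp only [this]
    simp

def findQ_alt (tasks : List Int) (S : Int) (debug : Bool) : Int :=
  findQ_alt_loop tasks S 0

-- ===== PRECONDITION & SPEC =====
def Spec_findQ (tasks : List Int) (S : Int) (debug : Bool) (out : Int) : Prop := out = findQ_alt tasks S debug
instance (tasks : List Int) (S : Int) (debug : Bool) (out : Int) : Decidable (Spec_findQ tasks S debug out) := by unfold Spec_findQ; infer_instance

-- ===== CLAIM (what is proved, stated in full; the proofs are below) =====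
def Claim_equal_findQ : Prop := ∀ (tasks : List Int) (S : Int) (debug : Bool), Dom_findQ tasks S debug → Spec_findQ tasks S debug (findQ tasks S debug)

-- ===== LEMMAS AND PROOFS =====

-- head of the descending sort is the maximum value, and its tail is the descending sort of the erase
theorem sortedDesc_cons (l : List Int) (h : l ≠ []) :
    ∃ m t, PySem.List.sorted l (fun x => x) true = m :: t ∧
      l.max? = some m ∧
      PySem.List.sorted (l.erase m) (fun x => x) true = t := by
  cases hs : PySem.List.sorted l (fun x => x) true with
  | nil => exact absurd ((PySem.List.sorted_eq_nil_iff l (fun x => x) true).mp hs) h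
  | cons m t =>
    have hperm : (m :: t).Perm l := hs ▸ PySem.List.sorted_perm l (fun x => x) true
    have hmem : m ∈ l := hperm.mem_iff.mp (by simp)
    have hmax : ∀ y ∈ l, y ≤ m := by
      intro y hy
      simpa using PySem.List.key_head_sorted_rev_ge (xs := l) (key := fun x => x) hs y hy
    refine ⟨m, t, rfl, ?_, ?_⟩
    · exact List.max?_eq_some_iff.mpr ⟨hmem, hmax⟩
    · have hpt : (m :: t).Pairwise (fun a b : Int => b ≤ a) := by
        have := PySem.List.sorted_pairwise_rev l (fun x => x)
        rw [hs] at this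
        simpa using this
      have hperm' : t.Perm (l.erase m) :=
        (List.perm_cons m).mp (hperm.trans (List.perm_cons_erase hmem))
      have hsp : (PySem.List.sorted (l.erase m) (fun x => x) true).Pairwise
          (fun a b : Int => b ≤ a) := by
        simpa using PySem.List.sorted_pairwise_rev (l.erase m) (fun x => x)
      have hp2 : (PySem.List.sorted (l.erase m) (fun x => x) true).Perm t :=
        (PySem.List.sorted_perm (l.erase m) (fun x => x) true).trans hperm'.symm
      exact hp2.eq_of_pairwise
        (fun a b _ _ h1 h2 => le_antisymm h2 h1) hsp (List.Pairwise.of_cons hpt)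

theorem loop_agree : ∀ (n : Nat) (l : List Int) (S q c : Int), l.length ≤ n →
    findQ_loop (PySem.List.sorted l (fun x => x) true) S q c = findQ_alt_loop l (S - q) c := by
  intro n
  induction n with
  | zero =>
    intro l S q c hl
    have : l = [] := List.eq_nil_of_length_eq_zero (Nat.le_zero.mp hl)
    subst this
    simp [PySem.List.sorted, findQ_loop, findQ_alt_loop]
  | succ n ih =>
    intro l S q c hl
    cases l with
    | nil => simp [PySem.List.sorted, findQ_loop, findQ_alt_loop]
    | cons x xs =>
      obtain ⟨m, t, hs, hmax, ht⟩ := sortedDesc_cons (x :: xs) (by simp)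
      have hmem : m ∈ x :: xs := (List.max?_eq_some_iff.mp hmax).1
      rw [hs]
      rw [findQ_alt_loop]
      simp only [hmax, Option.getD_some]
      by_cases hgt : q + m > S
      · have h2 : m > S - q := by omega
        simp [findQ_loop, h2, hgt]
      · have h1 : ¬ m > S - q := by omega
        have hlen : ((x :: xs).erase m).length ≤ n := by
          have := List.length_erase_of_mem hmem
          simp only [this]
          simp at hl ⊢
          omega
        have hih := ih ((x :: xs).erase m) S (q + m) (c + 1) hlen
        rw [ht] at hih
        have heq : S - q - m = S - (q + m) := by ring
        simp only [findQ_loop]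
        rw [if_neg hgt, if_neg h1, heq, hih]

-- ===== VERDICT (by name: the statement is the Claim_ definition above) =====
theorem findQ_spec : Claim_equal_findQ := by
  intro tasks S debug _
  show findQ tasks S debug = findQ_alt tasks S debug
  unfold findQ findQ_alt
  have := loop_agree tasks.length tasks S 0 0 le_rfl
  simpa using this
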